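-- pv_equiv track=rewrite | github.com/dongmingli-Ben/covid-19-modeling | extract_explode_data.py | check_explode
-- ===== SOURCE A (Python) =====
-- def check_explode(arr):
--     if len(arr) < 5 or max(arr) < 10:
--         return False
--     # consecutive 5 days with new confirmed > 10
--     cnt = 0
--     for i in range(len(arr)):
--         if arr[i] > 10:
--             cnt += 1
--         else:
--             cnt = 0
--         if cnt >= 5: return True
--     return False
-- ===== SOURCE B (Python) =====
-- def check_explode(arr):
--     # sliding window: some window of 5 consecutive days is entirely > 10
--     while len(arr) >= 5:
--         if all(x > 10 for x in arr[:5]):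
--             return True
--         arr = arr[1:]
--     return False
-- ===== Notes on version B (the rewrite author's own statement) =====
-- stated objective: simpler
-- what changed: Replaces the reset-counter scan (with separate len/max guards) by a direct sliding-window test: slide over the list and return True as soon as one window of 5 consecutive values is entirely > 10; no guards needed.
import Mathlib
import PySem

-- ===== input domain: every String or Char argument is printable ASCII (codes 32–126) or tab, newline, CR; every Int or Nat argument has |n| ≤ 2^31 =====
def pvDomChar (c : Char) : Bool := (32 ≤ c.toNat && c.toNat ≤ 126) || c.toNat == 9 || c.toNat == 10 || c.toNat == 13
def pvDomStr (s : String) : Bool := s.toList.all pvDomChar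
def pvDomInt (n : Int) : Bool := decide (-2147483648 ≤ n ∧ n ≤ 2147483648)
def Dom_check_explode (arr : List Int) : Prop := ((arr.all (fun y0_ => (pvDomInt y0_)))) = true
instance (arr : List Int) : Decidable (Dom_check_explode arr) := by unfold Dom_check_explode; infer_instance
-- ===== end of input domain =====

-- B replaces A's reset-counter scan (with len/max guards) by a sliding-window test; objective: simpler.

-- ===== PORT A =====
-- the reset-counter loop: for i in range(len(arr)): …, with early return when cnt >= 5
def goA : List Int → Nat → Bool
  | [], _ => false
  | x :: xs, cnt =>
    let c := if 10 < x then cnt + 1 else 0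
    if 5 ≤ c then true else goA xs c

def check_explode (arr : List Int) : Bool :=
  if arr.length < 5 then false
  else
    match PySem.List.max? arr (fun x => x) with
    | none => false   -- unreachable: arr nonempty here (length ≥ 5)
    | some m => if m < 10 then false else goA arr 0

-- ===== PORT B =====
def check_explode_alt (arr : List Int) : Bool :=
  if h : 5 ≤ arr.length then
    if (PySem.List.slice arr none (some (5 : Int))).all (fun x => decide (10 < x)) then true
    else check_explode_alt (PySem.List.slice arr (some (1 : Int)) none)
  else false
termination_by arr.length
decreasing_by simp [PySem.List.slice_from_one]; omega

-- ===== PRECONDITION & SPEC =====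
def Spec_check_explode (arr : List Int) (out : Bool) : Prop := out = check_explode_alt arr
instance (arr : List Int) (out : Bool) : Decidable (Spec_check_explode arr out) := by unfold Spec_check_explode; infer_instance

-- ===== CLAIM (what is proved, stated in full; the proofs are below) =====
def Claim_equal_check_explode : Prop := ∀ (arr : List Int), Dom_check_explode arr → Spec_check_explode arr (check_explode arr)

-- ===== LEMMAS AND PROOFS =====

-- "the first n elements exist and are all > 10"
def headAll (n : Nat) (xs : List Int) : Bool :=
  decide (n ≤ xs.length) && (xs.take n).all (fun x => decide (10 < x))

theorem alt_short {xs : List Int} (h : xs.length < 5) : check_explode_alt xs = false := by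
  unfold check_explode_alt
  simp [show ¬ (5 ≤ xs.length) from by omega]

theorem alt_step {xs : List Int} (h : 5 ≤ xs.length) :
    check_explode_alt xs = ((xs.take 5).all (fun x => decide (10 < x)) || check_explode_alt xs.tail) := by
  conv_lhs => rw [check_explode_alt]
  have h5 : PySem.List.slice xs none (some (5 : Int)) = xs.take 5 := by
    simpa using PySem.List.slice_to_natCast xs 5
  rw [dif_pos h, h5, PySem.List.slice_from_one]
  by_cases hall : (xs.take 5).all (fun x => decide (10 < x)) = true <;> simp [hall]

theorem take5_cons (a : Int) (t : List Int) : (a :: t).take 5 = a :: t.take 4 := rfl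

theorem window_false {a : Int} {t : List Int} (ha : ¬ 10 < a) :
    ((a :: t).take 5).all (fun x => decide (10 < x)) = false := by
  rw [take5_cons]
  simp [ha]

theorem alt_none : ∀ (xs : List Int), (∀ x ∈ xs, ¬ (10 < x)) → check_explode_alt xs = false := by
  intro xs
  induction xs with
  | nil => intro _; exact alt_short (by simp)
  | cons a t ih =>
    intro hx
    by_cases h : 5 ≤ (a :: t).length
    · rw [alt_step h, window_false (hx a (by simp))]
      simpa using ih (fun x hxm => hx x (List.mem_cons_of_mem _ hxm))
    · exact alt_short (by omega)

theorem headAll5_imp_alt {xs : List Int} (h : headAll 5 xs = true) : check_explode_alt xs = true := by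
  unfold headAll at h
  simp only [Bool.and_eq_true, decide_eq_true_eq] at h
  rw [alt_step h.1, h.2]
  simp

theorem main_lemma : ∀ (xs : List Int) (cnt : Nat), cnt ≤ 4 →
    goA xs cnt = (headAll (5 - cnt) xs || check_explode_alt xs) := by
  intro xs
  induction xs with
  | nil =>
    intro cnt hc
    have h0 : check_explode_alt ([] : List Int) = false := alt_short (by simp)
    simp [goA, headAll, h0]
    omega
  | cons a t ih =>
    intro cnt hc
    by_cases ha : 10 < a
    · by_cases hc4 : cnt = 4
      · subst hc4
        have hh : headAll (5 - 4) (a :: t) = true := by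
          simp [headAll, ha]
        simp [goA, ha, hh]
      · have hgo : goA (a :: t) cnt = goA t (cnt + 1) := by
          simp [goA, ha]; omega
        rw [hgo, ih (cnt + 1) (by omega)]
        have hsplit : 5 - cnt = (4 - cnt) + 1 := by omega
        have hhead : headAll (5 - cnt) (a :: t) = headAll (4 - cnt) t := by
          rw [hsplit]
          simp [headAll, List.take_succ_cons, ha]
        rw [hhead]
        have hcnt1 : 5 - (cnt + 1) = 4 - cnt := by omega
        rw [hcnt1]
        by_cases hlen : 5 ≤ (a :: t).length
        · rw [alt_step hlen, List.tail_cons]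
          by_cases hw : ((a :: t).take 5).all (fun x => decide (10 < x)) = true
          · have hW : headAll (4 - cnt) t = true := by
              rw [take5_cons] at hw
              simp only [List.all_cons, Bool.and_eq_true] at hw
              unfold headAll
              rw [Bool.and_eq_true]
              refine ⟨by simp only [List.length_cons] at hlen; simp; omega, ?_⟩
              have hpref : t.take (4 - cnt) = (t.take 4).take (4 - cnt) := by
                rw [List.take_take]; congr 1; omega
              rw [hpref]
              exact List.all_eq_true.2 fun x hxm =>
                (List.all_eq_true.1 hw.2) x (List.mem_of_mem_take hxm)
            simp [hW]
          · simp only [Bool.not_eq_true] at hw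
            rw [hw]
            simp
        · have h1 : check_explode_alt (a :: t) = false := alt_short (by omega)
          have h2 : check_explode_alt t = false := alt_short (by simp at hlen ⊢; omega)
          rw [h1, h2]
    · have hgo : goA (a :: t) cnt = goA t 0 := by
        simp [goA, ha]
      rw [hgo, ih 0 (by omega)]
      have hhead : headAll (5 - cnt) (a :: t) = false := by
        have hsplit : 5 - cnt = (4 - cnt) + 1 := by omega
        rw [hsplit]
        simp [headAll, List.take_succ_cons, ha]
      rw [hhead, Bool.false_or]
      by_cases hlen : 5 ≤ (a :: t).length
      · rw [alt_step hlen, window_false ha, Bool.false_or, List.tail_cons]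
        by_cases hh : headAll 5 t = true
        · rw [hh, headAll5_imp_alt hh]; simp
        · simp only [Bool.not_eq_true] at hh; rw [hh]; simp
      · have h1 : check_explode_alt (a :: t) = false := alt_short (by omega)
        have h2 : check_explode_alt t = false := alt_short (by simp at hlen ⊢; omega)
        have h3 : headAll 5 t = false := by
          unfold headAll
          simp at hlen ⊢
          intro hge; omega
        rw [h1, h2, h3]
        rfl

-- ===== VERDICT (by name: the statement is the Claim_ definition above) =====
theorem check_explode_spec : Claim_equal_check_explode := by
  intro arr _
  unfold Spec_check_explode check_explode
  by_cases h5 : arr.length < 5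
  · rw [if_pos h5, alt_short h5]
  · rw [if_neg h5]
    obtain ⟨a, t, rfl⟩ : ∃ a t, arr = a :: t := by
      cases arr with
      | nil => simp at h5
      | cons a t => exact ⟨a, t, rfl⟩
    rw [PySem.List.max?_id_cons]
    show (if t.foldl max a < 10 then false else goA (a :: t) 0) = check_explode_alt (a :: t)
    by_cases hm10 : t.foldl max a < 10
    · rw [if_pos hm10]
      symm
      apply alt_none
      intro x hx
      have hle : x ≤ t.foldl max a := by
        rcases List.mem_cons.1 hx with rfl | hxt
        · exact (PySem.List.le_foldl_max t x).1
        · exact (PySem.List.le_foldl_max t a).2 x hxt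
      omega
    · rw [if_neg hm10]
      rw [main_lemma (a :: t) 0 (by omega)]
      simp only [Nat.sub_zero]
      by_cases hh : headAll 5 (a :: t) = true
      · rw [hh, headAll5_imp_alt hh]; simp
      · simp only [Bool.not_eq_true] at hh; rw [hh]; simp
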